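-- pv_equiv track=rewrite | github.com/philsurette/androcles | src/inline_text_differ.py | _word_range_for_tokens
-- ===== SOURCE A (Python) =====
-- def _word_range_for_tokens(
--
--     expected_word_indices: list[int | None],
--     start: int,
--     end: int,
-- ) -> tuple[int, int] | None:
--     word_indices = [idx for idx in expected_word_indices[start:end] if idx is not None]
--     if not word_indices:
--         return None
--     return min(word_indices), max(word_indices)
-- ===== SOURCE B (Python) =====
-- def _word_range_for_tokens(
--     expected_word_indices,
--     start,
--     end,
-- ):
--     vals = sorted(idx for idx in expected_word_indices[start:end] if idx is not None)
--     if not vals: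
--         return None
--     return vals[0], vals[-1]
-- ===== Notes on version B (the rewrite author's own statement) =====
-- stated objective: alternative
-- what changed: B sorts the non-None indices of the slice and reads the extrema off the ends of the sorted list (vals[0], vals[-1]), instead of A's separate min() and max() passes over a filtered list.
import Mathlib
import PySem

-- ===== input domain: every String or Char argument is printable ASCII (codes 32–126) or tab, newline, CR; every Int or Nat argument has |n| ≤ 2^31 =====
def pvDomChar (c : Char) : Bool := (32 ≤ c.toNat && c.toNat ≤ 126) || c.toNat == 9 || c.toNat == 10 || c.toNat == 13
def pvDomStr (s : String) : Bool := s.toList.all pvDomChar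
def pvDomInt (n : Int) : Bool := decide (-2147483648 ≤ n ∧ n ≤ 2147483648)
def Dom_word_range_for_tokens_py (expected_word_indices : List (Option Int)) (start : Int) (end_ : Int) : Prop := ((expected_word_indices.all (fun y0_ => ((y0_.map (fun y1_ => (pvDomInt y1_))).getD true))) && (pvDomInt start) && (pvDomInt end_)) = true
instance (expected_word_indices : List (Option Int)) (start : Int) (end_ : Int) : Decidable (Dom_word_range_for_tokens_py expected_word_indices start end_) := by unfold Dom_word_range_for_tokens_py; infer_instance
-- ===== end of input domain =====

-- B sorts the non-None indices of the slice and reads the extrema off the ends, instead of A's separate min()/max() passes; same result, alternative algorithm.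
-- ===== PORT A =====
def word_range_for_tokens_py (expected_word_indices : List (Option Int)) (start : Int) (end_ : Int) : Option (Int × Int) :=
  let word_indices := (PySem.List.slice expected_word_indices (some start) (some end_)).filterMap id
  if word_indices = [] then none
  else
    match PySem.List.min? word_indices (fun x => x), PySem.List.max? word_indices (fun x => x) with
    | some m, some M => some (m, M)
    | _, _ => none   -- unreachable: word_indices is nonempty here

-- ===== PORT B =====
def word_range_for_tokens_py_alt (expected_word_indices : List (Option Int)) (start : Int) (end_ : Int) : Option (Int × Int) :=
  let vals := PySem.List.sorted ((PySem.List.slice expected_word_indices (some start) (some end_)).filterMap id) (fun x => x) false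
  match vals with
  | [] => none
  | x :: t => some (x, (x :: t).getLast (by simp))

-- ===== PRECONDITION & SPEC =====
def Spec_word_range_for_tokens_py (expected_word_indices : List (Option Int)) (start : Int) (end_ : Int) (out : Option (Int × Int)) : Prop := out = word_range_for_tokens_py_alt expected_word_indices start end_
instance (expected_word_indices : List (Option Int)) (start : Int) (end_ : Int) (out : Option (Int × Int)) : Decidable (Spec_word_range_for_tokens_py expected_word_indices start end_ out) := by unfold Spec_word_range_for_tokens_py; infer_instance

-- ===== CLAIM =====
def Claim_equal_word_range_for_tokens_py : Prop := ∀ (expected_word_indices : List (Option Int)) (start : Int) (end_ : Int), Dom_word_range_for_tokens_py expected_word_indices start end_ → Spec_word_range_for_tokens_py expected_word_indices start end_ (word_range_for_tokens_py expected_word_indices start end_)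

-- ===== LEMMAS AND PROOFS =====
-- in an ≤-sorted list, the last element bounds every member from above
theorem pw_getLast_ge (s : List Int) (h : s.Pairwise (· ≤ ·)) (hne : s ≠ []) :
    ∀ y ∈ s, y ≤ s.getLast hne := by
  induction s with
  | nil => cases hne rfl
  | cons x t ih =>
    intro y hy
    cases t with
    | nil => simp at hy; simp [hy]
    | cons a u =>
      rcases List.mem_cons.mp hy with heq | hy'
      · subst heq
        have hx : y ≤ (a :: u).getLast (by simp) :=
          le_trans (List.rel_of_pairwise_cons h (List.mem_cons_self))
            ((ih (List.Pairwise.of_cons h) (by simp)) a List.mem_cons_self)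
        simpa [List.getLast] using hx
      · have := ih (List.Pairwise.of_cons h) (by simp) y (by simpa using hy')
        simpa [List.getLast] using this

theorem sorted_head_last (ws : List Int) (x : Int) (t : List Int)
    (hs : PySem.List.sorted ws (fun x => x) false = x :: t) :
    PySem.List.min? ws (fun x => x) = some x ∧
      PySem.List.max? ws (fun x => x) = some ((x :: t).getLast (by simp)) := by
  have hperm : (x :: t).Perm ws := hs ▸ PySem.List.sorted_perm ws (fun x => x) false
  have hpw : (x :: t).Pairwise (fun a b : Int => a ≤ b) := by
    have := PySem.List.sorted_pairwise (xs := ws) (key := fun x : Int => x) (κ := Int)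
    rw [hs] at this; exact this
  have hxmem : x ∈ ws := hperm.mem_iff.mp List.mem_cons_self
  have hlmem : (x :: t).getLast (by simp) ∈ ws := hperm.mem_iff.mp (List.getLast_mem _)
  have hne : ws ≠ [] := fun h => by simp [h] at hxmem
  constructor
  · cases hm : PySem.List.min? ws (fun x => x) with
    | none => exact absurd ((PySem.List.min?_eq_none_iff _ _).mp hm) hne
    | some m =>
      have hmmem : m ∈ ws := PySem.List.min?_mem hm
      have h1 : m ≤ x := PySem.List.min?_isMin hm x hxmem
      have h2 : x ≤ m := PySem.List.key_head_sorted_le (xs := ws) (key := fun x : Int => x) hs m hmmem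
      exact congrArg some (le_antisymm h1 h2)
  · cases hm : PySem.List.max? ws (fun x => x) with
    | none => exact absurd ((PySem.List.max?_eq_none_iff _ _).mp hm) hne
    | some m =>
      have hmmem : m ∈ ws := PySem.List.max?_mem hm
      have h1 : (x :: t).getLast (by simp) ≤ m := PySem.List.max?_isMax hm _ hlmem
      have h2 : m ≤ (x :: t).getLast (by simp) :=
        pw_getLast_ge (x :: t) hpw (by simp) m (hperm.mem_iff.mpr hmmem)
      exact congrArg some (le_antisymm h2 h1)

-- ===== VERDICT =====
theorem word_range_for_tokens_py_spec : Claim_equal_word_range_for_tokens_py := by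
  intro l start end_ _
  unfold Spec_word_range_for_tokens_py word_range_for_tokens_py word_range_for_tokens_py_alt
  set ws := (PySem.List.slice l (some start) (some end_)).filterMap id with hws
  cases hs : PySem.List.sorted ws (fun x => x) false with
  | nil =>
    have : ws = [] := (PySem.List.sorted_eq_nil_iff _ _ _).mp hs
    simp [this]
  | cons x t =>
    have hne : ws ≠ [] := by
      intro h; rw [h] at hs; simp [PySem.List.sorted] at hs
    obtain ⟨hmin, hmax⟩ := sorted_head_last ws x t hs
    simp [hne, hmin, hmax]
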